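-- pv_equiv track=rewrite | github.com/vanthanh-vn/de4 | de2.py | sochiacho5_2
-- ===== SOURCE A (Python) =====
-- def sochiacho5_2(numbers):
--     scan = -1
--     for i in range(len(numbers)-1 ):
--         if numbers[i] % 5 == 0 :
--             scan = numbers[i]
--     if scan == -1:
--         return None
--     return scan
-- ===== SOURCE B (Python) =====
-- def sochiacho5_2(numbers):
--     # Backward early-exit search over all elements except the last:
--     # the last multiple of 5 in forward order is the first one scanning backward.
--     for i in range(len(numbers) - 2, -1, -1):
--         if numbers[i] % 5 == 0:
--             return numbers[i]
--     return None
-- ===== Notes on version B (the rewrite author's own statement) =====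
-- stated objective: faster
-- what changed: Replaces A's forward scan over all of numbers[:-1] with a sentinel accumulator by a backward search from index len-2 that returns the first multiple of 5 immediately (early exit).
import Mathlib
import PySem

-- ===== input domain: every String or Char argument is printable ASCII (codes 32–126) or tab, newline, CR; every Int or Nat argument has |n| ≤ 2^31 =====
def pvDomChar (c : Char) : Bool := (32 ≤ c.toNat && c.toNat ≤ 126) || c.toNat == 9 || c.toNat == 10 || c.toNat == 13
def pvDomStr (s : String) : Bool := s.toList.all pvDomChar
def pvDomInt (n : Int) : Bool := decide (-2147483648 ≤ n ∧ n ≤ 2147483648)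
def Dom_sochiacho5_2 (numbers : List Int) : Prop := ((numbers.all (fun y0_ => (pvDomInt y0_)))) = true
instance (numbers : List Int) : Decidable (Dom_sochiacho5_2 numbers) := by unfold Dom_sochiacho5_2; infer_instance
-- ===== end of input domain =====

-- ===== PORT A =====
-- A: forward scan over indices 0..len-2, sentinel -1 overwritten by each multiple of 5.
def sochiacho5_2 (numbers : List Int) : Option Int :=
  let scan : Int :=
    (List.range (numbers.length - 1)).foldl
      (fun scan i => if numbers.getD i 0 % 5 = 0 then numbers.getD i 0 else scan) (-1)
  if scan = -1 then none else some scan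

-- ===== PORT B =====
-- B: backward early-exit search over all elements except the last (Source B's reverse loop).
def altFind : List Int → Option Int
  | [] => none
  | x :: xs => if x % 5 = 0 then some x else altFind xs

def sochiacho5_2_alt (numbers : List Int) : Option Int :=
  altFind ((numbers.take (numbers.length - 1)).reverse)

-- ===== PRECONDITION & SPEC =====
def Spec_sochiacho5_2 (numbers : List Int) (out : Option Int) : Prop := out = sochiacho5_2_alt numbers
instance (numbers : List Int) (out : Option Int) : Decidable (Spec_sochiacho5_2 numbers out) := by unfold Spec_sochiacho5_2; infer_instance

-- ===== CLAIM (what is proved, stated in full; the proofs are below) =====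
def Claim_equal_sochiacho5_2 : Prop := ∀ (numbers : List Int), Dom_sochiacho5_2 numbers → Spec_sochiacho5_2 numbers (sochiacho5_2 numbers)

-- ===== LEMMAS AND PROOFS =====

-- first match in l ++ [x]: a match in l wins, otherwise x is tested
theorem altFind_append_singleton (l : List Int) (x : Int) :
    altFind (l ++ [x]) =
      match altFind l with
      | some v => some v
      | none => if x % 5 = 0 then some x else none := by
  induction l with
  | nil => simp [altFind]
  | cons y ys ih =>
      by_cases h : y % 5 = 0 <;> simp [altFind, h, ih]

-- A's sentinel fold over a list equals B's backward search (with acc as fallback)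
theorem fold_eq_altFind_reverse (xs : List Int) (acc : Int) :
    xs.foldl (fun s x => if x % 5 = 0 then x else s) acc =
      match altFind xs.reverse with
      | some v => v
      | none => acc := by
  induction xs generalizing acc with
  | nil => simp [altFind]
  | cons x xs ih =>
      simp only [List.foldl_cons, List.reverse_cons, altFind_append_singleton, ih]
      cases altFind xs.reverse with
      | some v => simp
      | none => by_cases h : x % 5 = 0 <;> simp [h]

-- A's fold over indices is a fold over the prefix list
theorem range_fold_eq_take_fold (numbers : List Int) (n : Nat) (hn : n ≤ numbers.length) (acc : Int) :
    (List.range n).foldl (fun s i => if numbers.getD i 0 % 5 = 0 then numbers.getD i 0 else s) acc =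
      (numbers.take n).foldl (fun s x => if x % 5 = 0 then x else s) acc := by
  induction n generalizing acc with
  | zero => simp
  | succ m ih =>
      have hm : m ≤ numbers.length := Nat.le_of_succ_le hn
      have hlt : m < numbers.length := hn
      rw [List.range_succ, List.foldl_append, ih hm,
        List.take_add_one, List.foldl_append]
      simp [List.getElem?_eq_getElem hlt, List.getD]

-- any value B returns is a multiple of 5, hence never the sentinel -1
theorem altFind_mod (l : List Int) (v : Int) (h : altFind l = some v) : v % 5 = 0 := by
  induction l with
  | nil => simp [altFind] at h
  | cons x xs ih =>
      by_cases hx : x % 5 = 0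
      · simp [altFind, hx] at h; omega
      · simp [altFind, hx] at h; exact ih h

-- ===== VERDICT (by name: the statement is the Claim_ definition above) =====
theorem sochiacho5_2_spec : Claim_equal_sochiacho5_2 := by
  intro numbers _
  unfold Spec_sochiacho5_2 sochiacho5_2 sochiacho5_2_alt
  rw [range_fold_eq_take_fold numbers (numbers.length - 1) (Nat.sub_le _ _),
    fold_eq_altFind_reverse]
  cases hv : altFind ((numbers.take (numbers.length - 1)).reverse) with
  | none => simp
  | some v =>
      have h5 := altFind_mod _ _ hv
      have : v ≠ -1 := by omega
      simp [this]
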